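-- pv_equiv track=rewrite | github.com/lmesz/crane | crane/Backend/Deployer.py | __interpolate_string
-- ===== SOURCE A (Python) =====
-- def __interpolate_string(string, params):
--     has_work = True
--     result = ""
--     while has_work:
--         start = string.find("%(")
--         if start == -1:
--             result += string
--             has_work = False
--         else:
--             end = string.find(")%", start)
--             if end == -1:
--                 result += string
--                 has_work = False
--             else:
--                 param = string[start + 2:end]
--                 result += string[0:start]
--                 value = params.get(param, "")
--                 result += value
--                 string = string[end + 2:]
--     return result
-- ===== SOURCE B (Python) =====
-- import re
--
-- _PATTERN = re.compile(r'%\((.*?)\)%', re.DOTALL)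
--
-- def __interpolate_string(string, params):
--     return _PATTERN.sub(lambda m: params.get(m.group(1), ''), string)
-- ===== Notes on version B (the rewrite author's own statement) =====
-- stated objective: idiomatic
-- what changed: Replaces the hand-written find/chop while-loop with a single compiled regex substitution %\((.*?)\)% (re.DOTALL) whose lambda looks up each key in params with default ''.
import Mathlib
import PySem

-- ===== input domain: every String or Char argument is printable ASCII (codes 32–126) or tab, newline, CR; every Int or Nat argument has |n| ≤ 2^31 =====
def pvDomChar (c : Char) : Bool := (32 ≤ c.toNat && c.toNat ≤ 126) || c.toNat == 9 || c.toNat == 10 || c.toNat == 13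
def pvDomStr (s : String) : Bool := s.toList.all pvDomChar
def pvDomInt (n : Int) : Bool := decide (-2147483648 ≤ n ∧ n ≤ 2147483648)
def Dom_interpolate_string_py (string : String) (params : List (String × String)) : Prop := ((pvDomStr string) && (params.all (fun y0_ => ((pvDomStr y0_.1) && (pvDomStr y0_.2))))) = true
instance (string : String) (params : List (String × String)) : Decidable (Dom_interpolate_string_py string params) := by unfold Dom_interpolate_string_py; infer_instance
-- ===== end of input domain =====

-- B replaces A's find/chop while-loop by a single regex substitution %\((.*?)\)% (re.DOTALL);
-- its port is the regex engine's left-to-right scan for this pattern. Objective: idiomatic.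

-- params.get(key, "") — Python dict built from the association list (last key wins), shared semantics of both versions
def pvLookup (params : List (String × String)) (key : List Char) : List Char :=
  ((PySem.Dict.ofList params).getD (String.ofList key) "").toList

-- ===== PORT A =====
-- A's while-loop: find "%(", find ")%" after it, emit prefix + value, continue on the rest
def pvInterpA (params : List (String × String)) (s : List Char) : List Char :=
  let start := PySem.Chars.find s ['%', '(']
  if _hs : start = -1 then s
  else
    let e := PySem.Chars.findFrom s [')', '%'] start
    if _he : e = -1 then s
    else
      PySem.List.slice s (some 0) (some start) ++
        pvLookup params (PySem.List.slice s (some (start + 2)) (some e)) ++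
        pvInterpA params (PySem.List.slice s (some (e + 2)) none)
termination_by s.length
decreasing_by
  have h0 : (0:Int) ≤ start := by
    have := PySem.Chars.neg_one_le_find s ['%', '(']
    omega
  have hk : start.toNat ≤ s.length := by
    have := PySem.Chars.find_le_length s ['%', '(']
    omega
  have hs2 : ['%', '('] <:+: s := (PySem.Chars.find_ne_neg_one_iff s ['%', '(']).mp _hs
  have hlen : 2 ≤ s.length := by
    have := hs2.length_le
    simpa using this
  have he0 : (0:Int) ≤ e := by
    have : PySem.Chars.findFrom s [')', '%'] start
        = if PySem.Chars.find (s.drop start.toNat) [')', '%'] = -1 then -1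
          else (start.toNat : Int) + PySem.Chars.find (s.drop start.toNat) [')', '%'] := by
      have := PySem.Chars.findFrom_natCast s [')', '%'] start.toNat hk
      simpa [Int.toNat_of_nonneg h0] using this
    by_cases hc : PySem.Chars.find (s.drop start.toNat) [')', '%'] = -1
    · exact absurd (by simpa [hc] using this) _he
    · have hge := PySem.Chars.neg_one_le_find (s.drop start.toNat) [')', '%']
      simp only [e]
      rw [this]
      simp [hc]
      omega
  have : PySem.List.slice s (some (e + 2)) none = s.drop (e + 2).toNat :=
    PySem.List.slice_from s (show (0:Int) ≤ e + 2 by omega)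
  rw [this]
  simp [List.length_drop]
  omega

def interpolate_string_py (string : String) (params : List (String × String)) : String :=
  String.ofList (pvInterpA params string.toList)

-- ===== PORT B =====
-- the regex engine's scan for %\((.*?)\)%: at each position try the literal "%(" then the
-- shortest completion up to ")%"; on a match emit the replacement and resume after it,
-- otherwise copy one character and advance
def pvInterpB (params : List (String × String)) : List Char → List Char
  | [] => []
  | '%' :: '(' :: t =>
      let k := PySem.Chars.find t [')', '%']
      if _hk : k = -1 then '%' :: pvInterpB params ('(' :: t)
      else
        pvLookup params (PySem.List.slice t (some 0) (some k)) ++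
          pvInterpB params (PySem.List.slice t (some (k + 2)) none)
  | c :: rest => c :: pvInterpB params rest
termination_by s => s.length
decreasing_by
  · simp
  · have hk0 : (0:Int) ≤ k := by
      have := PySem.Chars.neg_one_le_find t [')', '%']
      omega
    have : PySem.List.slice t (some (k + 2)) none = t.drop (k + 2).toNat :=
      PySem.List.slice_from t (show (0:Int) ≤ k + 2 by omega)
    rw [this]
    simp [List.length_drop]
    omega
  · simp

def interpolate_string_py_alt (string : String) (params : List (String × String)) : String :=
  String.ofList (pvInterpB params string.toList)

-- ===== PRECONDITION & SPEC =====
def Spec_interpolate_string_py (string : String) (params : List (String × String)) (out : String) : Prop := out = interpolate_string_py_alt string params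
instance (string : String) (params : List (String × String)) (out : String) : Decidable (Spec_interpolate_string_py string params out) := by unfold Spec_interpolate_string_py; infer_instance

-- ===== CLAIM (what is proved, stated in full; the proofs are below) =====
def Claim_equal_interpolate_string_py : Prop := ∀ (string : String) (params : List (String × String)), Dom_interpolate_string_py string params → Spec_interpolate_string_py string params (interpolate_string_py string params)

-- ===== LEMMAS AND PROOFS =====

theorem pv_infix_iff (sub s : List Char) : sub <:+: s ↔ ∃ j, sub <+: s.drop j := by
  rw [← PySem.Chars.isIn_iff_infix, ← PySem.Chars.exists_prefix_drop_iff_isIn]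

-- find points at j when sub starts at j and nowhere earlier
theorem pv_find_intro (s sub : List Char) (j : Nat) (h1 : sub <+: s.drop j)
    (h2 : ∀ i < j, ¬ sub <+: s.drop i) : PySem.Chars.find s sub = (j : Int) := by
  have hnn : 0 ≤ PySem.Chars.find s sub :=
    (PySem.Chars.find_nonneg_iff s sub).mpr ((pv_infix_iff sub s).mpr ⟨j, h1⟩)
  obtain ⟨hp, hmin⟩ := PySem.Chars.find_spec hnn
  have hj : (PySem.Chars.find s sub).toNat = j := by
    rcases lt_trichotomy (PySem.Chars.find s sub).toNat j with h | h | h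
    · exact absurd hp (h2 _ h)
    · exact h
    · exact absurd h1 (hmin _ h)
  omega

theorem pv_find_cons_pos (c : Char) (cs sub : List Char) (hne : ¬ sub <+: (c :: cs)) (k : Nat)
    (hk : PySem.Chars.find cs sub = (k : Int)) :
    PySem.Chars.find (c :: cs) sub = ((k + 1 : Nat) : Int) := by
  have hnn : 0 ≤ PySem.Chars.find cs sub := by omega
  obtain ⟨hp, hmin⟩ := PySem.Chars.find_spec hnn
  have hkt : (PySem.Chars.find cs sub).toNat = k := by omega
  apply pv_find_intro
  · simpa [List.drop_succ_cons, hkt] using hp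
  · intro i hi
    cases i with
    | zero => simpa using hne
    | succ i' =>
      have := hmin i' (by omega)
      simpa [List.drop_succ_cons, hkt] using this

theorem pv_find_cons_neg (c : Char) (cs sub : List Char) (hne : ¬ sub <+: (c :: cs))
    (hk : PySem.Chars.find cs sub = -1) : PySem.Chars.find (c :: cs) sub = -1 := by
  rw [PySem.Chars.find_eq_neg_one_iff] at hk ⊢
  intro hinf
  rw [pv_infix_iff] at hinf
  obtain ⟨j, hj⟩ := hinf
  cases j with
  | zero => exact hne (by simpa using hj)
  | succ j' => exact hk ((pv_infix_iff _ _).mpr ⟨j', by simpa [List.drop_succ_cons] using hj⟩)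

-- B copies a character that does not open a match
theorem pv_step_copy (params : List (String × String)) (c : Char) (rest : List Char)
    (h : ∀ t, ¬(c = '%' ∧ rest = '(' :: t)) :
    pvInterpB params (c :: rest) = c :: pvInterpB params rest := by
  rw [pvInterpB.eq_def]
  rcases rest with _ | ⟨c2, t2⟩
  · simp [pvInterpB]
  · by_cases hc : c = '%'
    · by_cases hc2 : c2 = '('
      · exact absurd ⟨hc, by rw [hc2]⟩ (h t2)
      · subst hc; simp [hc2]
    · simp [hc]

-- when no ")%" occurs, B copies everything
theorem pv_copy_noclose (params : List (String × String)) :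
    ∀ u : List Char, ¬ [')', '%'] <:+: u → pvInterpB params u = u := by
  intro u
  induction u using pvInterpB.induct with
  | case1 => intro _; simp [pvInterpB]
  | case2 t k hk ih =>
    intro h
    have hk' : PySem.Chars.find t [')', '%'] = -1 := hk
    rw [pvInterpB.eq_def]
    simp only [hk', reduceDIte]
    have h' : ¬ [')', '%'] <:+: ('(' :: t) := fun hi => h (hi.trans (List.suffix_cons '%' _).isInfix)
    rw [ih h']
  | case3 t k hk ih =>
    intro h
    exfalso
    have hk' : ¬ PySem.Chars.find t [')', '%'] = -1 := hk
    have : [')', '%'] <:+: t := by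
      by_contra hcon
      exact hk' ((PySem.Chars.find_eq_neg_one_iff t [')', '%']).mpr hcon)
    exact h (this.trans ((List.suffix_cons '(' t).trans (List.suffix_cons '%' _)).isInfix)
  | case4 c rest hne ih =>
    intro h
    rw [pv_step_copy params c rest (fun t ⟨h1, h2⟩ => hne t h1 h2)]
    have h' : ¬ [')', '%'] <:+: rest := fun hi => h (hi.trans (List.suffix_cons c rest).isInfix)
    rw [ih h']

-- when no "%(" occurs, B copies everything
theorem pv_copy_noopen (params : List (String × String)) :
    ∀ u : List Char, ¬ ['%', '('] <:+: u → pvInterpB params u = u := by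
  intro u
  induction u using pvInterpB.induct with
  | case1 => intro _; simp [pvInterpB]
  | case2 t k hk ih =>
    intro h
    exact absurd (show ['%', '('] <+: '%' :: '(' :: t from ⟨t, rfl⟩).isInfix h
  | case3 t k hk ih =>
    intro h
    exact absurd (show ['%', '('] <+: '%' :: '(' :: t from ⟨t, rfl⟩).isInfix h
  | case4 c rest hne ih =>
    intro h
    rw [pv_step_copy params c rest (fun t ⟨h1, h2⟩ => hne t h1 h2)]
    have h' : ¬ ['%', '('] <:+: rest := fun hi => h (hi.trans (List.suffix_cons c rest).isInfix)
    rw [ih h']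

-- B copies a prefix none of whose positions opens a "%("
theorem pv_shift (params : List (String × String)) :
    ∀ (pre v : List Char), (∀ i < pre.length, ¬ ['%', '('] <+: (pre ++ v).drop i) →
      pvInterpB params (pre ++ v) = pre ++ pvInterpB params v := by
  intro pre
  induction pre with
  | nil => intro v _; simp
  | cons c pre' ih =>
    intro v h
    have hhead : ∀ t, ¬(c = '%' ∧ pre' ++ v = '(' :: t) := by
      rintro t ⟨h1, h2⟩
      exact h 0 (by simp) (by subst h1; rw [List.cons_append, h2]; exact ⟨t, rfl⟩)
    rw [List.cons_append, pv_step_copy params c (pre' ++ v) hhead,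
      ih v (fun i hi => by simpa [List.drop_succ_cons] using h (i + 1) (by simpa using hi))]
    simp

theorem pv_main_bounded (params : List (String × String)) :
    ∀ (n : Nat) (s : List Char), s.length ≤ n → pvInterpA params s = pvInterpB params s := by
  intro n
  induction n with
  | zero =>
    intro s hs
    have : s = [] := List.eq_nil_of_length_eq_zero (by omega)
    subst this
    have h1 : PySem.Chars.find [] ['%', '('] = -1 := by decide
    rw [pvInterpA.eq_def]
    simp [h1, pvInterpB]
  | succ n ih =>
    intro s hs
    rw [pvInterpA.eq_def]
    by_cases hfound : PySem.Chars.find s ['%', '('] = -1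
    · simp only [hfound, dif_pos]
      rw [pv_copy_noopen params s ((PySem.Chars.find_eq_neg_one_iff s _).mp hfound)]
    · have h0 : 0 ≤ PySem.Chars.find s ['%', '('] := by
        have := PySem.Chars.neg_one_le_find s ['%', '(']
        omega
      obtain ⟨hp, hmin⟩ := PySem.Chars.find_spec h0
      set j := (PySem.Chars.find s ['%', '(']).toNat with hjdef
      have hfind : PySem.Chars.find s ['%', '('] = (j : Int) := by omega
      have hjle : j ≤ s.length := by
        have := PySem.Chars.find_le_length s ['%', '(']
        omega
      obtain ⟨t, ht⟩ := hp
      have hdropj : s.drop j = '%' :: '(' :: t := ht.symm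
      have hsplit : s = s.take j ++ ('%' :: '(' :: t) := by
        conv_lhs => rw [← List.take_append_drop j s, hdropj]
      have hlen_take : (s.take j).length = j := by simp [hjle]
      have hff : PySem.Chars.findFrom s [')', '%'] (j : Int)
          = if PySem.Chars.find (s.drop j) [')', '%'] = -1 then -1
            else (j : Int) + PySem.Chars.find (s.drop j) [')', '%'] :=
        PySem.Chars.findFrom_natCast s [')', '%'] j hjle
      have hnp1 : ¬ [')', '%'] <+: ('%' :: '(' :: t) := by simp [List.cons_prefix_cons]
      have hnp2 : ¬ [')', '%'] <+: ('(' :: t) := by simp [List.cons_prefix_cons]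
      have hshift : pvInterpB params (s.take j ++ ('%' :: '(' :: t))
          = s.take j ++ pvInterpB params ('%' :: '(' :: t) := by
        apply pv_shift
        intro i hi
        rw [← hsplit]
        exact hmin i (by omega)
      by_cases hk : PySem.Chars.find t [')', '%'] = -1
      · -- unterminated: A appends the whole remaining string; B copies it verbatim
        have h2 : PySem.Chars.find ('(' :: t) [')', '%'] = -1 := pv_find_cons_neg _ _ _ hnp2 hk
        have h3 : PySem.Chars.find ('%' :: '(' :: t) [')', '%'] = -1 := pv_find_cons_neg _ _ _ hnp1 h2
        have he : PySem.Chars.findFrom s [')', '%'] (PySem.Chars.find s ['%', '(']) = -1 := by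
          rw [hfind, hff, hdropj, h3]
          simp
        simp only [hfound, he, dif_pos]
        conv_rhs => rw [hsplit]
        rw [hshift, pvInterpB.eq_def]
        simp only [hk, reduceDIte]
        rw [pv_copy_noclose params ('(' :: t)
          (fun hi => ((PySem.Chars.find_eq_neg_one_iff _ _).mp h2) hi)]
        exact hsplit
      · -- a full match: both emit prefix + value and continue after ")%"
        set k := (PySem.Chars.find t [')', '%']).toNat with hkdef
        have hk0 : PySem.Chars.find t [')', '%'] = (k : Int) := by
          have := PySem.Chars.neg_one_le_find t [')', '%']
          omega
        have h2 : PySem.Chars.find ('(' :: t) [')', '%'] = ((k + 1 : Nat) : Int) :=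
          pv_find_cons_pos _ _ _ hnp2 k hk0
        have h3 : PySem.Chars.find ('%' :: '(' :: t) [')', '%'] = ((k + 1 + 1 : Nat) : Int) :=
          pv_find_cons_pos _ _ _ hnp1 (k + 1) h2
        have hE : PySem.Chars.findFrom s [')', '%'] (PySem.Chars.find s ['%', '('])
            = ((j + k + 2 : Nat) : Int) := by
          rw [hfind, hff, hdropj, h3]
          have h4 : ¬ ((k + 1 + 1 : Nat) : Int) = -1 := by omega
          rw [if_neg h4]
          push_cast
          ring
        have hE_ne : ¬ PySem.Chars.findFrom s [')', '%'] (PySem.Chars.find s ['%', '(']) = -1 := by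
          rw [hE]; omega
        simp only [hfound, hE_ne]
        -- rewrite A's three slices
        have hs0 : PySem.List.slice s (some 0) (some (PySem.Chars.find s ['%', '('])) = s.take j := by
          rw [hfind, PySem.List.slice_zero_start, PySem.List.slice_to_natCast]
        have hdrop2 : s.drop (j + 2) = t := by
          have : s.drop (j + 2) = (s.drop j).drop 2 := by rw [List.drop_drop]
          rw [this, hdropj]
          rfl
        have hE' : PySem.Chars.findFrom s [')', '%'] ((j : Nat) : Int) = ((j + k + 2 : Nat) : Int) := by
          rw [← hfind]; exact hE
        have hs1 : PySem.List.slice s (some (PySem.Chars.find s ['%', '('] + 2))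
            (some (PySem.Chars.findFrom s [')', '%'] (PySem.Chars.find s ['%', '(']))) = t.take k := by
          rw [hfind, hE']
          have h1 : ((j : Int) + 2) = ((j + 2 : Nat) : Int) := by push_cast; ring
          rw [h1, PySem.List.slice_natCast, hdrop2]
          congr 1
          omega
        have hs2 : PySem.List.slice s
            (some (PySem.Chars.findFrom s [')', '%'] (PySem.Chars.find s ['%', '(']) + 2)) none
            = t.drop (k + 2) := by
          rw [hE]
          have h1 : (((j + k + 2 : Nat) : Int) + 2) = ((j + k + 4 : Nat) : Int) := by push_cast; ring
          rw [h1, PySem.List.slice_from_natCast, ← hdrop2, List.drop_drop]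
          congr 1
          omega
        rw [hs0, hs1, hs2]
        -- B's side
        conv_rhs => rw [hsplit]
        rw [hshift, pvInterpB.eq_def]
        simp only [hk0, reduceDIte]
        have hk_ne : ¬ ((k : Nat) : Int) = -1 := by omega
        simp only [hk_ne, reduceDIte]
        have hb0 : PySem.List.slice t (some 0) (some ((k : Nat) : Int)) = t.take k := by
          rw [PySem.List.slice_zero_start, PySem.List.slice_to_natCast]
        have hb1 : PySem.List.slice t (some (((k : Nat) : Int) + 2)) none = t.drop (k + 2) := by
          have h1 : (((k : Nat) : Int) + 2) = ((k + 2 : Nat) : Int) := by push_cast; ring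
          rw [h1, PySem.List.slice_from_natCast]
        rw [hb0, hb1]
        -- the recursive tail: induction hypothesis on the strictly shorter remainder
        have hlen_t : s.length = j + 2 + t.length := by
          conv_lhs => rw [hsplit]
          simp [hlen_take]
          omega
        have hih : pvInterpA params (t.drop (k + 2)) = pvInterpB params (t.drop (k + 2)) := by
          apply ih
          rw [List.length_drop]
          omega
        rw [hih]
        simp [List.append_assoc]

-- ===== VERDICT (by name: the statement is the Claim_ definition above) =====
theorem interpolate_string_py_spec : Claim_equal_interpolate_string_py := by
  intro string params _
  unfold Spec_interpolate_string_py interpolate_string_py interpolate_string_py_alt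
  rw [pv_main_bounded params string.toList.length string.toList le_rfl]
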